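-- pv_equiv track=rewrite | github.com/rootsdev/nama | src/data/normalize.py | _merge_prefixes
-- ===== SOURCE A (Python) =====
-- from typing import List, Set
--
-- def _merge_prefixes(beginning_prefixes: Set[str], anywhere_prefixes: Set[str], name_pieces: List[str]) -> List[str]:
--     prefixes = []
--     pieces = []
--     for ix, piece in enumerate(name_pieces):
--         if (ix == 0 and piece in beginning_prefixes) or (piece in anywhere_prefixes):
--             prefixes.append(piece)
--         else:
--             if len(prefixes) > 0:
--                 piece = "".join(prefixes) + piece
--                 prefixes = []
--             pieces.append(piece)
--     if len(prefixes) > 0: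
--         piece = "".join(prefixes)
--         pieces.append(piece)
--     return pieces
-- ===== SOURCE B (Python) =====
-- from typing import List, Set
--
-- def _merge_prefixes(beginning_prefixes: Set[str], anywhere_prefixes: Set[str], name_pieces: List[str]) -> List[str]:
--     # Right-to-left: a prefix piece merges into the head of the result built so far
--     # (or starts it); a non-prefix piece is pushed as a new element at the front.
--     result = []
--     for ix in range(len(name_pieces) - 1, -1, -1):
--         piece = name_pieces[ix]
--         if (ix == 0 and piece in beginning_prefixes) or (piece in anywhere_prefixes):
--             if result:
--                 result[0] = piece + result[0]
--             else:
--                 result = [piece]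
--         else:
--             result.insert(0, piece)
--     return result
-- ===== Notes on version B (the rewrite author's own statement) =====
-- stated objective: alternative
-- what changed: B traverses the pieces right-to-left and builds the output back-to-front: a prefix piece is merged into the head of the output built so far (or starts it) and a non-prefix piece is pushed as a new front element, replacing A's forward pass with a pending-prefix accumulator that is joined and prepended at each anchor.
import Mathlib
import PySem

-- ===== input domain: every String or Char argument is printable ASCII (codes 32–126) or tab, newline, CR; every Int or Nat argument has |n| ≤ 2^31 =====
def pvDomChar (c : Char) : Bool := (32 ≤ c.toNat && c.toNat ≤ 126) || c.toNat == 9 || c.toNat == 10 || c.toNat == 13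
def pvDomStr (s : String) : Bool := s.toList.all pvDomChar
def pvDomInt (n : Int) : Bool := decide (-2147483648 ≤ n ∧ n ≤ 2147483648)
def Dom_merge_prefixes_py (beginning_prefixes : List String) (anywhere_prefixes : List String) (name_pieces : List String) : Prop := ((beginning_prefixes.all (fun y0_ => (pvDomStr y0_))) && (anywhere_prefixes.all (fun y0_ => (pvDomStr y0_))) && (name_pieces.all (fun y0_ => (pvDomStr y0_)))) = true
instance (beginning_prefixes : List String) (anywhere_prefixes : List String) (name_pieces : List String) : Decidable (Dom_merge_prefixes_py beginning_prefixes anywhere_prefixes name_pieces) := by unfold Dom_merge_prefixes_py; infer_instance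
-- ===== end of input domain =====

-- B traverses the pieces right-to-left, building the output back-to-front (prefixes merge
-- into the head of the partial result); same return value, similar cost.

-- ===== PORT A =====
-- A: forward pass accumulating pending prefixes; on a non-prefix piece, the joined pending
-- prefixes are prepended to it and it is emitted; trailing prefixes are emitted joined.
def merge_prefixes_py (beginning_prefixes : List String) (anywhere_prefixes : List String) (name_pieces : List String) : List String :=
  let st := (PySem.List.enumerate name_pieces).foldl
    (fun (st : List String × List String) (p : Int × String) =>
      if (p.1 == 0 && beginning_prefixes.contains p.2) || anywhere_prefixes.contains p.2 then
        (st.1 ++ [p.2], st.2)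
      else if st.1.length > 0 then
        ([], st.2 ++ [PySem.Str.join "" st.1 ++ p.2])
      else
        (st.1, st.2 ++ [p.2]))
    ([], [])
  if st.1.length > 0 then st.2 ++ [PySem.Str.join "" st.1] else st.2

-- ===== PORT B =====
-- B: right-to-left loop (a foldr over the enumerated pieces): a prefix piece is merged into
-- the head of the result built so far (or starts it), a non-prefix piece is consed in front.
def merge_prefixes_py_alt (beginning_prefixes : List String) (anywhere_prefixes : List String) (name_pieces : List String) : List String :=
  (PySem.List.enumerate name_pieces).foldr
    (fun (p : Int × String) (result : List String) =>
      if (p.1 == 0 && beginning_prefixes.contains p.2) || anywhere_prefixes.contains p.2 then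
        match result with
        | [] => [p.2]
        | h :: t => (p.2 ++ h) :: t
      else p.2 :: result)
    []

-- ===== PRECONDITION & SPEC =====
def Spec_merge_prefixes_py (beginning_prefixes : List String) (anywhere_prefixes : List String) (name_pieces : List String) (out : List String) : Prop := out = merge_prefixes_py_alt beginning_prefixes anywhere_prefixes name_pieces
instance (beginning_prefixes : List String) (anywhere_prefixes : List String) (name_pieces : List String) (out : List String) : Decidable (Spec_merge_prefixes_py beginning_prefixes anywhere_prefixes name_pieces out) := by unfold Spec_merge_prefixes_py; infer_instance

-- ===== CLAIM (what is proved, stated in full; the proofs are below) =====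
def Claim_equal_merge_prefixes_py : Prop := ∀ (beginning_prefixes : List String) (anywhere_prefixes : List String) (name_pieces : List String), Dom_merge_prefixes_py beginning_prefixes anywhere_prefixes name_pieces → Spec_merge_prefixes_py beginning_prefixes anywhere_prefixes name_pieces (merge_prefixes_py beginning_prefixes anywhere_prefixes name_pieces)

-- ===== LEMMAS AND PROOFS =====

theorem join_empty_nil : PySem.Str.join "" ([] : List String) = "" := by decide

-- "".join(ps ++ [p]) = "".join(ps) + p
theorem chars_join_nil_append_singleton (ps : List (List Char)) (p : List Char) :
    PySem.Chars.join [] (ps ++ [p]) = PySem.Chars.join [] ps ++ p := by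
  induction ps with
  | nil => simp [PySem.Chars.join, List.intercalate]
  | cons x xs ih =>
    cases xs with
    | nil => simp [PySem.Chars.join_cons_cons, PySem.Chars.join_singleton]
    | cons y ys => simp_all [PySem.Chars.join_cons_cons]

-- "".join(ps ++ [p]) = "".join(ps) + p
theorem join_empty_append_singleton (ps : List String) (p : String) :
    PySem.Str.join "" (ps ++ [p]) = PySem.Str.join "" ps ++ p := by
  simp [PySem.Str.join, chars_join_nil_append_singleton]

-- A's step function, abstracted over the prefix test
def stepA (fl : Int × String → Bool) (st : List String × List String) (p : Int × String) :
    List String × List String :=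
  if fl p then (st.1 ++ [p.2], st.2)
  else if st.1.length > 0 then ([], st.2 ++ [PySem.Str.join "" st.1 ++ p.2])
  else (st.1, st.2 ++ [p.2])

-- B's step function, abstracted over the prefix test
def stepB (fl : Int × String → Bool) (p : Int × String) (result : List String) : List String :=
  if fl p then
    match result with
    | [] => [p.2]
    | h :: t => (p.2 ++ h) :: t
  else p.2 :: result

-- merge a string into the head of a list (or start it)
def mergeHead (s : String) : List String → List String
  | [] => [s]
  | h :: t => (s ++ h) :: t

-- the common recursive specification: pending prefixes `pre`, remaining enumerated pieces
def gMerge (fl : Int × String → Bool) : List String → List (Int × String) → List String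
  | pre, [] => if pre = [] then [] else [PySem.Str.join "" pre]
  | pre, x :: rest =>
    if fl x then gMerge fl (pre ++ [x.2]) rest
    else (PySem.Str.join "" pre ++ x.2) :: gMerge fl [] rest

theorem mergeHead_mergeHead (a b : String) (L : List String) :
    mergeHead a (mergeHead b L) = mergeHead (a ++ b) L := by
  cases L <;> simp [mergeHead, String.append_assoc]

-- A's fold computes gMerge
theorem foldA_eq_gMerge (fl : Int × String → Bool) (l : List (Int × String)) :
    ∀ (pre out : List String),
      (let st := l.foldl (stepA fl) (pre, out)
       if st.1.length > 0 then st.2 ++ [PySem.Str.join "" st.1] else st.2)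
      = out ++ gMerge fl pre l := by
  induction l with
  | nil =>
    intro pre out
    cases pre <;> simp [gMerge]
  | cons x rest ih =>
    intro pre out
    simp only [List.foldl_cons, stepA, gMerge]
    by_cases h : fl x = true
    · simp only [h, if_true]
      exact ih (pre ++ [x.2]) out
    · simp only [h, if_false, Bool.false_eq_true]
      cases pre with
      | nil =>
        simpa [join_empty_nil] using ih [] (out ++ [x.2])
      | cons a as =>
        simpa using ih [] (out ++ [PySem.Str.join "" (a :: as) ++ x.2])

-- B's foldr, shifted by pending prefixes, also computes gMerge
theorem gMerge_eq_foldB (fl : Int × String → Bool) (l : List (Int × String)) :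
    ∀ (pre : List String),
      gMerge fl pre l
      = (if pre = [] then l.foldr (stepB fl) []
         else mergeHead (PySem.Str.join "" pre) (l.foldr (stepB fl) [])) := by
  induction l with
  | nil =>
    intro pre
    cases pre <;> simp [gMerge, mergeHead]
  | cons x rest ih =>
    intro pre
    simp only [gMerge, List.foldr_cons, stepB]
    by_cases h : fl x = true
    · simp only [h, if_true]
      rw [ih (pre ++ [x.2])]
      have hpre : pre ++ [x.2] ≠ [] := by simp
      rw [if_neg hpre, join_empty_append_singleton]
      cases pre with
      | nil =>
        simp [join_empty_nil]
        cases hrest : rest.foldr (stepB fl) [] <;> simp [mergeHead]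
      | cons a as =>
        rw [if_neg (List.cons_ne_nil a as), ← mergeHead_mergeHead]
        congr 1
    · simp only [h, if_false, Bool.false_eq_true]
      rw [ih []]
      cases pre with
      | nil => simp [join_empty_nil]
      | cons a as => simp [mergeHead]

-- ===== VERDICT (by name: the statement is the Claim_ definition above) =====
theorem merge_prefixes_py_spec : Claim_equal_merge_prefixes_py := by
  intro bp ap nps _
  unfold Spec_merge_prefixes_py merge_prefixes_py merge_prefixes_py_alt
  have hA := foldA_eq_gMerge
    (fun p => (p.1 == 0 && bp.contains p.2) || ap.contains p.2)
    (PySem.List.enumerate nps) [] []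
  have hB := gMerge_eq_foldB
    (fun p => (p.1 == 0 && bp.contains p.2) || ap.contains p.2)
    (PySem.List.enumerate nps) []
  rw [List.nil_append] at hA
  rw [if_pos rfl] at hB
  exact hA.trans hB
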